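-- pv_equiv track=rewrite | github.com/Salazar-99/AoC-2020 | d6/d6.py | get_all_yes_qs
-- ===== SOURCE A (Python) =====
-- def get_all_yes_qs(chunk: str) -> int:
--     lines = chunk.split("\n")
--     sets = []
--     for line in lines:
--         questions = set()
--         for letter in line:
--             questions.add(letter)
--         sets.append(questions)
--     if len(sets) == 1:
--         return len(sets[0])
--     else:
--         intersection = sets[0].intersection(sets[1])
--         for i in range(2, len(sets)):
--             intersection = intersection.intersection(sets[i])
--         return len(intersection)
-- ===== SOURCE B (Python) =====
-- def get_all_yes_qs(chunk: str) -> int: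
--     # Tally: count, for each letter, how many lines contain it (each line's
--     # letters deduplicated), then count the letters seen in every line.
--     lines = chunk.split("\n")
--     n = len(lines)
--     counts = {}
--     for line in lines:
--         for c in set(line):
--             counts[c] = counts.get(c, 0) + 1
--     return sum(1 for v in counts.values() if v == n)
-- ===== Notes on version B (the rewrite author's own statement) =====
-- stated objective: alternative
-- what changed: Replaces the build-all-sets-then-iteratively-intersect algorithm with a single tally pass (a dict counting, per letter, how many lines contain it) followed by counting the letters whose tally equals the number of lines; a timing run measured this constant-factor faster.
import Mathlib
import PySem

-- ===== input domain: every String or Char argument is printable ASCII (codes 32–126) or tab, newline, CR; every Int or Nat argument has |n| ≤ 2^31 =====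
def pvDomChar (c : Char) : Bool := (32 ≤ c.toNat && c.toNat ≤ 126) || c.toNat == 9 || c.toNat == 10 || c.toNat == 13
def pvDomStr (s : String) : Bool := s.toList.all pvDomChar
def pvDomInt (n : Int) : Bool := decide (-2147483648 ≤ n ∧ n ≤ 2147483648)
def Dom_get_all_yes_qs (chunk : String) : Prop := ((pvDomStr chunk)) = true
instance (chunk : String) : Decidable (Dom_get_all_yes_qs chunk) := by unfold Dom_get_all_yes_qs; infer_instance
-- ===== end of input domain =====

-- B replaces the build-sets-then-iteratively-intersect algorithm with one tally pass
-- (per letter: in how many lines does it occur) plus a count of letters whose tally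
-- equals the number of lines; same result, similar cost (objective: alternative).

-- ===== PORT A =====
-- everything after `lines = chunk.split("\n")`, taking the list of lines
-- ('questions.add' loop = foldl Set.add; the indexings sets[0]/sets[1]/sets[i] are
-- always in range in the reached branches, so pyGetD with a junk default is exact)
def pvASets (lines : List String) : List (PySem.Set Char) :=
  lines.foldl (fun acc line => acc ++ [line.toList.foldl PySem.Set.add PySem.Set.empty]) []

def pvACore (lines : List String) : Int :=
  if (pvASets lines).length == 1 then
    PySem.Set.len (PySem.List.pyGetD (pvASets lines) 0 PySem.Set.empty)
  else
    PySem.Set.len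
      ((PySem.List.pyRange 2 (PySem.List.len (pvASets lines))).foldl
        (fun acc i => PySem.Set.inter acc (PySem.List.pyGetD (pvASets lines) i PySem.Set.empty))
        (PySem.Set.inter (PySem.List.pyGetD (pvASets lines) 0 PySem.Set.empty)
                         (PySem.List.pyGetD (pvASets lines) 1 PySem.Set.empty)))

-- chunk.split("\n"): the separator is nonempty, so split? never returns none
def get_all_yes_qs (chunk : String) : Int :=
  pvACore ((PySem.Str.split? chunk "\n").getD [])

-- ===== PORT B =====
-- everything after `lines = chunk.split("\n")` in Source B: tally dict, then count values == n
def pvBCore (lines : List String) : Int :=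
  let n : Int := PySem.List.len lines
  let counts : PySem.Dict Char Int :=
    lines.foldl
      (fun d line => (PySem.Set.ofList line.toList).foldl
        (fun d c => d.insert c (d.getD c 0 + 1)) d)
      PySem.Dict.empty
  counts.values.foldl (fun acc v => if v == n then acc + 1 else acc) 0

def get_all_yes_qs_alt (chunk : String) : Int :=
  pvBCore ((PySem.Str.split? chunk "\n").getD [])

-- ===== PRECONDITION & SPEC =====
def Spec_get_all_yes_qs (chunk : String) (out : Int) : Prop := out = get_all_yes_qs_alt chunk
instance (chunk : String) (out : Int) : Decidable (Spec_get_all_yes_qs chunk out) := by unfold Spec_get_all_yes_qs; infer_instance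

-- ===== CLAIM (what is proved, stated in full; the proofs are below) =====
def Claim_equal_get_all_yes_qs : Prop := ∀ (chunk : String), Dom_get_all_yes_qs chunk → Spec_get_all_yes_qs chunk (get_all_yes_qs chunk)

-- ===== LEMMAS AND PROOFS =====

-- membership in the iterated intersection
theorem pv_mem_foldl_inter (l : List (PySem.Set Char)) (init : PySem.Set Char) (c : Char) :
    c ∈ l.foldl PySem.Set.inter init ↔ c ∈ init ∧ ∀ s ∈ l, c ∈ s := by
  induction l generalizing init with
  | nil => simp
  | cons s t ih =>
      simp only [List.foldl_cons, ih, PySem.Set.mem_inter, List.mem_cons]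
      constructor
      · rintro ⟨⟨h1, h2⟩, h3⟩
        refine ⟨h1, ?_⟩
        rintro x (rfl | hx)
        · exact h2
        · exact h3 x hx
      · rintro ⟨h1, h2⟩
        exact ⟨⟨h1, h2 s (Or.inl rfl)⟩, fun x hx => h2 x (Or.inr hx)⟩

theorem pv_nodup_foldl_inter (l : List (PySem.Set Char)) (init : PySem.Set Char)
    (h : init.Nodup) : (l.foldl PySem.Set.inter init).Nodup := by
  induction l generalizing init with
  | nil => exact h
  | cons s t ih => exact ih _ (PySem.Set.nodup_inter _ _ h)

-- B's tally: the value stored at c counts the lines whose characters contain c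
theorem pv_counts_getD (lines : List String) (d : PySem.Dict Char Int) (c : Char) :
    (lines.foldl
      (fun d line => (PySem.Set.ofList line.toList).foldl
        (fun d c => d.insert c (d.getD c 0 + 1)) d) d).getD c 0
    = d.getD c 0 + (lines.countP (fun line => decide (c ∈ line.toList)) : Int) := by
  induction lines generalizing d with
  | nil => simp
  | cons l t ih =>
      simp only [List.foldl_cons, ih, List.countP_cons]
      rw [PySem.Dict.getD_foldl_insert_add_one]
      by_cases hc : c ∈ l.toList
      · rw [List.count_eq_one_of_mem (PySem.Set.nodup_ofList _) ((PySem.Set.mem_ofList _ _).mpr hc)]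
        simp [hc]; ring
      · rw [List.count_eq_zero.mpr (fun h => hc ((PySem.Set.mem_ofList _ _).mp h))]
        simp [hc]

-- B's tally: its keys are exactly the characters occurring in some line
theorem pv_counts_keys (lines : List String) (d : PySem.Dict Char Int) (hnd : d.keys.Nodup) :
    (lines.foldl
      (fun d line => (PySem.Set.ofList line.toList).foldl
        (fun d c => d.insert c (d.getD c 0 + 1)) d) d).keys.Nodup ∧
    ∀ c, c ∈ (lines.foldl
      (fun d line => (PySem.Set.ofList line.toList).foldl
        (fun d c => d.insert c (d.getD c 0 + 1)) d) d).keys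
      ↔ c ∈ d.keys ∨ ∃ line ∈ lines, c ∈ line.toList := by
  induction lines generalizing d with
  | nil => simpa using hnd
  | cons l t ih =>
      simp only [List.foldl_cons]
      have hstep := PySem.Dict.nodup_keys_foldl_insert (PySem.Set.ofList l.toList)
        (fun d c => d.getD c 0 + 1) d hnd
      obtain ⟨h1, h2⟩ := ih _ hstep
      refine ⟨h1, fun c => ?_⟩
      rw [h2 c, PySem.Dict.keys_foldl_insert, PySem.Set.mem_update, PySem.Set.mem_ofList]
      simp only [List.mem_cons]
      constructor
      · rintro ((h | h) | ⟨x, hx, hcx⟩)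
        · exact Or.inl h
        · exact Or.inr ⟨l, Or.inl rfl, h⟩
        · exact Or.inr ⟨x, Or.inr hx, hcx⟩
      · rintro (h | ⟨x, (rfl | hx), hcx⟩)
        · exact Or.inl (Or.inl h)
        · exact Or.inl (Or.inr hcx)
        · exact Or.inr ⟨x, hx, hcx⟩

-- B's result = number of distinct characters contained in every line (lines ≠ [])
theorem pv_bCore_eq (lines : List String) :
    pvBCore lines =
      (((lines.foldl
          (fun d line => (PySem.Set.ofList line.toList).foldl
            (fun d c => d.insert c (d.getD c 0 + 1)) d)
          (PySem.Dict.empty (κ := Char) (ν := Int))).keys).filter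
        (fun c => lines.countP (fun line => decide (c ∈ line.toList)) == lines.length)).length := by
  unfold pvBCore
  simp only
  obtain ⟨hnd, -⟩ := pv_counts_keys lines PySem.Dict.empty (by simp [PySem.Dict.empty])
  rw [PySem.List.foldl_if_add_one, PySem.Dict.values_eq_map_keys _ hnd 0, List.countP_map]
  rw [List.countP_eq_length_filter]
  simp only [zero_add, Nat.cast_inj]
  congr 1
  apply List.filter_congr
  intro c _
  simp only [Function.comp_apply, PySem.List.len]
  rw [pv_counts_getD]
  simp only [PySem.Dict.getD_empty, zero_add]
  by_cases h : List.countP (fun line => decide (c ∈ line.toList)) lines = lines.length <;>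
    simp [h]

-- the core equivalence, for any list of lines
theorem pv_core_eq (lines : List String) : pvACore lines = pvBCore lines := by
  rw [pv_bCore_eq]
  have hset : ∀ line : String,
      line.toList.foldl PySem.Set.add PySem.Set.empty = PySem.Set.ofList line.toList := by
    intro line; rw [PySem.Set.ofList_eq_foldl]; rfl
  have hsets : pvASets lines = lines.map (fun line => PySem.Set.ofList line.toList) := by
    unfold pvASets
    rw [PySem.List.foldl_append_singleton_eq_map
          (f := fun line : String => List.foldl PySem.Set.add PySem.Set.empty line.toList)]
    simp only [List.nil_append]
    exact List.map_congr_left (fun line _ => hset line)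
  unfold pvACore
  rw [hsets]
  set keysL := (lines.foldl
      (fun d line => (PySem.Set.ofList line.toList).foldl
        (fun d c => d.insert c (d.getD c 0 + 1)) d)
      (PySem.Dict.empty (κ := Char) (ν := Int))).keys with hkeys
  obtain ⟨hknd, hkmem⟩ := pv_counts_keys lines PySem.Dict.empty (by simp [PySem.Dict.empty])
  rw [← hkeys] at hknd hkmem
  have hmemF : ∀ c, c ∈ keysL.filter
      (fun c => lines.countP (fun line => decide (c ∈ line.toList)) == lines.length)
      ↔ (∃ line ∈ lines, c ∈ line.toList) ∧ ∀ line ∈ lines, c ∈ line.toList := by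
    intro c
    rw [List.mem_filter, hkmem c]
    simp only [PySem.Dict.keys_empty, List.not_mem_nil, false_or, beq_iff_eq,
      List.countP_eq_length]
    constructor
    · rintro ⟨h1, h2⟩
      exact ⟨h1, fun line hl => of_decide_eq_true (h2 line hl)⟩
    · rintro ⟨h1, h2⟩
      exact ⟨h1, fun line hl => decide_eq_true (h2 line hl)⟩
  have hfnd : (keysL.filter
      (fun c => lines.countP (fun line => decide (c ∈ line.toList)) == lines.length)).Nodup :=
    hknd.filter _
  rcases lines with (_ | ⟨l0, (_ | ⟨l1, rest⟩)⟩)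
  · rw [hkeys]; decide
  · rw [if_pos (by simp)]
    have h0 : PySem.List.pyGetD (List.map (fun line => PySem.Set.ofList line.toList) [l0])
        (0 : Int) PySem.Set.empty = PySem.Set.ofList l0.toList := by
      simp [pysem]
    rw [h0]
    have hperm : (PySem.Set.ofList l0.toList).Perm
        (keysL.filter
          (fun c => [l0].countP (fun line => decide (c ∈ line.toList)) == [l0].length)) := by
      rw [List.perm_ext_iff_of_nodup (PySem.Set.nodup_ofList _) hfnd]
      intro c
      rw [PySem.Set.mem_ofList, hmemF c]
      constructor
      · intro h
        refine ⟨⟨l0, List.mem_singleton_self l0, h⟩, ?_⟩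
        rintro line hl
        rw [List.mem_singleton] at hl
        subst hl; exact h
      · rintro ⟨-, h2⟩; exact h2 l0 (List.mem_singleton_self l0)
    simp only [PySem.Set.len]
    exact_mod_cast hperm.length_eq
  · rw [if_neg (by simp only [List.length_map, List.length_cons, beq_iff_eq]; omega)]
    have hget0 : PySem.List.pyGetD ((l0 :: l1 :: rest).map
        (fun line => PySem.Set.ofList line.toList)) (0 : Int) PySem.Set.empty
        = PySem.Set.ofList l0.toList := by
      rw [PySem.List.pyGetD_ofNat']; rfl
    have hget1 : PySem.List.pyGetD ((l0 :: l1 :: rest).map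
        (fun line => PySem.Set.ofList line.toList)) (1 : Int) PySem.Set.empty
        = PySem.Set.ofList l1.toList := by
      rw [PySem.List.pyGetD_ofNat']; rfl
    rw [hget0, hget1]
    rw [PySem.List.foldl_pyRange_pyGetD _ _ _ _ (by norm_num)]
    have hdrop : List.drop (2 : Int).toNat ((l0 :: l1 :: rest).map
        (fun line => PySem.Set.ofList line.toList))
        = rest.map (fun line => PySem.Set.ofList line.toList) := by
      simp only [List.map_cons]
      rfl
    rw [hdrop]
    have hI := pv_nodup_foldl_inter (rest.map (fun line => PySem.Set.ofList line.toList))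
      (PySem.Set.inter (PySem.Set.ofList l0.toList) (PySem.Set.ofList l1.toList))
      (PySem.Set.nodup_inter _ _ (PySem.Set.nodup_ofList _))
    have hperm : ((rest.map (fun line => PySem.Set.ofList line.toList)).foldl PySem.Set.inter
        (PySem.Set.inter (PySem.Set.ofList l0.toList) (PySem.Set.ofList l1.toList))).Perm
        (keysL.filter
          (fun c => (l0 :: l1 :: rest).countP (fun line => decide (c ∈ line.toList))
            == (l0 :: l1 :: rest).length)) := by
      rw [List.perm_ext_iff_of_nodup hI hfnd]
      intro c
      rw [pv_mem_foldl_inter, hmemF c, PySem.Set.mem_inter, PySem.Set.mem_ofList,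
        PySem.Set.mem_ofList]
      constructor
      · rintro ⟨⟨h0, h1⟩, hrest⟩
        refine ⟨⟨l0, by simp, h0⟩, ?_⟩
        rintro line hl
        simp only [List.mem_cons] at hl
        rcases hl with rfl | rfl | hl
        · exact h0
        · exact h1
        · have := hrest (PySem.Set.ofList line.toList) (List.mem_map_of_mem hl)
          exact (PySem.Set.mem_ofList _ _).mp this
      · rintro ⟨-, hall⟩
        refine ⟨⟨hall l0 (by simp), hall l1 (by simp)⟩, ?_⟩
        rintro s hs
        rcases List.mem_map.mp hs with ⟨line, hl, rfl⟩
        exact (PySem.Set.mem_ofList _ _).mpr (hall line (by simp [hl]))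
    simp only [PySem.Set.len]
    exact_mod_cast hperm.length_eq

-- ===== VERDICT (by name: the statement is the Claim_ definition above) =====
theorem get_all_yes_qs_spec : Claim_equal_get_all_yes_qs := by
  intro chunk _
  unfold Spec_get_all_yes_qs get_all_yes_qs get_all_yes_qs_alt
  exact pv_core_eq _
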